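-- pv_equiv track=rewrite | github.com/gobbledygook88/tree-sitter-printer | print.py | format_sexpression
-- ===== SOURCE A (Python) =====
-- def format_sexpression(s, indent_level=0, indent_size=4, use_colors=True):
--     """ChatGPT + TACIXAT (https://gist.github.com/TACIXAT/c5b2db4a80c812c4b4373b65e179a220)
--     + Claude 3.5 Sonnet to add terminal colours"""
--     output = ""
--     i = 0
--     # Initialize to False to avoid newline for the first token
--     need_newline = False
--     cdepth = []  # Track colons
--     while i < len(s):
--         if s[i] == "(":
--             output += "\n" + " " * (indent_level * indent_size)
--             output += "\033[34m(\033[0m" if use_colors else "("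
--             indent_level += 1
--             need_newline = False  # Avoid newline after opening parenthesis
--         elif s[i] == ":":
--             indent_level += 1
--             cdepth.append(indent_level)  # Store depth where we saw colon
--             output += "\033[33m:\033[0m" if use_colors else ":"
--         elif s[i] == ")":
--             indent_level -= 1
--             if len(cdepth) > 0 and indent_level == cdepth[-1]:
--                 # Unindent when we return to the depth we saw the last colon
--                 cdepth.pop()
--                 indent_level -= 1
--             output += "\033[34m)\033[0m" if use_colors else ")"
--             need_newline = True  # Newline needed after closing parenthesis
--         elif s[i] == " ":
--             output += " "
--         else:
--             j = i
--             while j < len(s) and s[j] not in ["(", ")", " ", ":"]: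
--                 j += 1
--             # Add newline and indentation only when needed
--             if need_newline:
--                 output += "\n" + " " * (indent_level * indent_size)
--             token = s[i:j]
--             output += f"\033[32m{token}\033[0m" if use_colors else token
--             i = j - 1
--             need_newline = True  # Next token should start on a new line
--         i += 1
--     return output
-- ===== SOURCE B (Python) =====
-- def format_sexpression(s, indent_level=0, indent_size=4, use_colors=True):
--     # Two passes: tokenize once, then run the formatting state machine over tokens.
--     tokens = []
--     i = 0
--     n = len(s)
--     while i < n:
--         if s[i] in "(): ":
--             tokens.append(s[i])
--             i += 1
--         else:
--             j = i + 1
--             while j < n and s[j] not in "(): ":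
--                 j += 1
--             tokens.append(s[i:j])
--             i = j
--     parts = []
--     need_newline = False
--     cdepth = []
--     for tok in tokens:
--         if tok == "(":
--             parts.append("\n" + " " * (indent_level * indent_size))
--             parts.append("\033[34m(\033[0m" if use_colors else "(")
--             indent_level += 1
--             need_newline = False
--         elif tok == ":":
--             indent_level += 1
--             cdepth.append(indent_level)
--             parts.append("\033[33m:\033[0m" if use_colors else ":")
--         elif tok == ")":
--             indent_level -= 1
--             if cdepth and indent_level == cdepth[-1]:
--                 cdepth.pop()
--                 indent_level -= 1
--             parts.append("\033[34m)\033[0m" if use_colors else ")")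
--             need_newline = True
--         elif tok == " ":
--             parts.append(" ")
--         else:
--             if need_newline:
--                 parts.append("\n" + " " * (indent_level * indent_size))
--             parts.append(f"\033[32m{tok}\033[0m" if use_colors else tok)
--             need_newline = True
--     return "".join(parts)
-- ===== Notes on version B (the rewrite author's own statement) =====
-- stated objective: faster
-- what changed: Replaced A's single interleaved character-index loop (inner identifier scan, index jumping, quadratic string += accumulation) by two passes: a tokenizer producing a token list, then a formatting state machine over tokens that appends pieces to a list and joins once at the end.
import Mathlib
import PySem

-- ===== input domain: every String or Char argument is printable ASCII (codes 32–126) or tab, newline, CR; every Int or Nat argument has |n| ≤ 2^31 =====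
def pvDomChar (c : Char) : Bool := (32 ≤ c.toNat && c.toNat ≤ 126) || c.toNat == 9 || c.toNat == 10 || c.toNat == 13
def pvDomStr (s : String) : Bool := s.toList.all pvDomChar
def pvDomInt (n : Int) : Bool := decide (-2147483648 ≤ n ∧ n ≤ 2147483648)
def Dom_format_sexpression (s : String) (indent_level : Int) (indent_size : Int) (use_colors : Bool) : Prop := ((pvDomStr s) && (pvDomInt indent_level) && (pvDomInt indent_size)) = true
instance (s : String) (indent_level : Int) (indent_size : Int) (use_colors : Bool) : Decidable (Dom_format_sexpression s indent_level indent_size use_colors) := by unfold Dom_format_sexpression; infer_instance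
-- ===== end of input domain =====

-- B re-decomposes A's single interleaved character loop into two passes (tokenize, then format
-- over tokens, collecting pieces in a list and joining once); same exact output, measured faster
-- (avoids repeated string concatenation).

-- ===== PORT A =====
-- shared notion: the four delimiter characters of the Python code
def pvDelimA (c : Char) : Bool := c = '(' || c = ')' || c = ' ' || c = ':'

-- Python " " * n  (empty for n ≤ 0), over List Char
def pvSpaces (n : Int) : List Char := List.replicate n.toNat ' '

-- A's inner while loop: scan the maximal run of non-delimiter characters
def pvScanA : List Char → List Char × List Char
  | [] => ([], [])
  | c :: cs => if pvDelimA c then ([], c :: cs)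
      else ((c :: (pvScanA cs).1), (pvScanA cs).2)

theorem pvScanA_len (cs : List Char) : (pvScanA cs).2.length ≤ cs.length := by
  induction cs with
  | nil => simp [pvScanA]
  | cons c cs ih =>
      simp only [pvScanA]
      split
      · simp
      · exact Nat.le_succ_of_le ih

-- A's main while loop, one step per iteration of Python's loop (the identifier branch
-- consumes the whole run, exactly as Python's `i = j - 1; i += 1` does).
def pvGoA : List Char → Int → Int → Bool → Bool → List Int → List Char → List Char
  | [], _, _, _, _, _, out => out
  | c :: cs, il, isz, uc, nn, cd, out =>
    if c = '(' then
      pvGoA cs (il + 1) isz uc false cd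
        (out ++ '\n' :: pvSpaces (il * isz) ++ (if uc then "\x1b[34m(\x1b[0m".toList else ['(']))
    else if c = ':' then
      pvGoA cs (il + 1) isz uc nn ((il + 1) :: cd)
        (out ++ (if uc then "\x1b[33m:\x1b[0m".toList else [':']))
    else if c = ')' then
      -- cd is Python's cdepth with its top at the HEAD (append = push, [-1] = head, pop = tail)
      if cd.head? = some (il - 1) then
        pvGoA cs (il - 2) isz uc true cd.tail
          (out ++ (if uc then "\x1b[34m)\x1b[0m".toList else [')']))
      else
        pvGoA cs (il - 1) isz uc true cd
          (out ++ (if uc then "\x1b[34m)\x1b[0m".toList else [')']))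
    else if c = ' ' then
      pvGoA cs il isz uc nn cd (out ++ [' '])
    else
      pvGoA (pvScanA cs).2 il isz uc true cd
        (out ++ (if nn then '\n' :: pvSpaces (il * isz) else [])
             ++ (if uc then "\x1b[32m".toList ++ (c :: (pvScanA cs).1) ++ "\x1b[0m".toList
                 else c :: (pvScanA cs).1))
  termination_by cs => cs.length
  decreasing_by
    all_goals simp
    exact pvScanA_len _

def format_sexpression (s : String) (indent_level : Int) (indent_size : Int) (use_colors : Bool) : String :=
  String.mk (pvGoA s.toList indent_level indent_size use_colors false [] [])

-- ===== PORT B =====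
-- Python " " * n for B's pieces (B-side copy so the ports share nothing)
def pvSpacesB (n : Int) : List Char := List.replicate n.toNat ' '

def pvDelimB (c : Char) : Bool := c = '(' || c = ')' || c = ':' || c = ' '

-- B's inner scan of an identifier run (the second while loop of Source B's tokenizer)
def pvScanB : List Char → List Char × List Char
  | [] => ([], [])
  | c :: cs => if pvDelimB c then ([], c :: cs)
      else ((c :: (pvScanB cs).1), (pvScanB cs).2)

theorem pvScanB_len (cs : List Char) : (pvScanB cs).2.length ≤ cs.length := by
  induction cs with
  | nil => simp [pvScanB]
  | cons c cs ih =>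
      simp only [pvScanB]
      split
      · simp
      · exact Nat.le_succ_of_le ih

-- pass 1: tokenize — delimiters are single-char tokens, identifier runs are grouped
def pvTokens : List Char → List (List Char)
  | [] => []
  | c :: cs =>
    if pvDelimB c then [c] :: pvTokens cs
    else (c :: (pvScanB cs).1) :: pvTokens (pvScanB cs).2
  termination_by cs => cs.length
  decreasing_by
    all_goals simp
    exact pvScanB_len _

-- "".join(parts)
def pvJoinB : List (List Char) → List Char
  | [] => []
  | p :: ps => p ++ pvJoinB ps

-- pass 2: the formatting state machine over the token list, emitting pieces
def pvGoB : List (List Char) → Int → Int → Bool → Bool → List Int → List (List Char)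
  | [], _, _, _, _, _ => []
  | t :: ts, il, isz, uc, nn, cd =>
    if t = ['('] then
      ('\n' :: pvSpacesB (il * isz)) :: (if uc then "\x1b[34m(\x1b[0m".toList else ['(']) ::
        pvGoB ts (il + 1) isz uc false cd
    else if t = [':'] then
      (if uc then "\x1b[33m:\x1b[0m".toList else [':']) ::
        pvGoB ts (il + 1) isz uc nn ((il + 1) :: cd)
    else if t = [')'] then
      (if uc then "\x1b[34m)\x1b[0m".toList else [')']) ::
        (if cd.head? = some (il - 1) then pvGoB ts (il - 2) isz uc true cd.tail
         else pvGoB ts (il - 1) isz uc true cd)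
    else if t = [' '] then
      [' '] :: pvGoB ts il isz uc nn cd
    else
      (if nn then ['\n' :: pvSpacesB (il * isz)] else []) ++
        (if uc then "\x1b[32m".toList ++ t ++ "\x1b[0m".toList else t) ::
        pvGoB ts il isz uc true cd

def format_sexpression_alt (s : String) (indent_level : Int) (indent_size : Int) (use_colors : Bool) : String :=
  String.mk (pvJoinB (pvGoB (pvTokens s.toList) indent_level indent_size use_colors false []))

-- ===== PRECONDITION & SPEC =====
def Spec_format_sexpression (s : String) (indent_level : Int) (indent_size : Int) (use_colors : Bool) (out : String) : Prop := out = format_sexpression_alt s indent_level indent_size use_colors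
instance (s : String) (indent_level : Int) (indent_size : Int) (use_colors : Bool) (out : String) : Decidable (Spec_format_sexpression s indent_level indent_size use_colors out) := by unfold Spec_format_sexpression; infer_instance

-- ===== CLAIM (what is proved, stated in full; the proofs are below) =====
def Claim_equal_format_sexpression : Prop := ∀ (s : String) (indent_level : Int) (indent_size : Int) (use_colors : Bool), Dom_format_sexpression s indent_level indent_size use_colors → Spec_format_sexpression s indent_level indent_size use_colors (format_sexpression s indent_level indent_size use_colors)

-- ===== LEMMAS AND PROOFS =====
theorem pvSpacesB_eq (n : Int) : pvSpacesB n = pvSpaces n := rfl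

theorem pvScan_eq (cs : List Char) : pvScanA cs = pvScanB cs := by
  induction cs with
  | nil => rfl
  | cons c cs ih =>
      simp only [pvScanA, pvScanB, ih]
      have : pvDelimA c = pvDelimB c := by
        simp only [pvDelimA, pvDelimB]
        by_cases h1 : c = '(' <;> by_cases h2 : c = ')' <;> by_cases h3 : c = ' ' <;>
          by_cases h4 : c = ':' <;> simp [h1, h2, h3, h4]
      rw [this]

theorem pvTokens_delim (c : Char) (cs : List Char) (h : pvDelimB c = true) :
    pvTokens (c :: cs) = [c] :: pvTokens cs := by
  rw [pvTokens, if_pos h]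

theorem pvTokens_ident (c : Char) (cs : List Char) (h : pvDelimB c = false) :
    pvTokens (c :: cs) = (c :: (pvScanB cs).1) :: pvTokens (pvScanB cs).2 := by
  rw [pvTokens, if_neg (by simp [h])]

theorem pvGoA_eq_goB (n : Nat) :
    ∀ (cs : List Char), cs.length ≤ n →
    ∀ (il isz : Int) (uc nn : Bool) (cd : List Int) (out : List Char),
      pvGoA cs il isz uc nn cd out = out ++ pvJoinB (pvGoB (pvTokens cs) il isz uc nn cd) := by
  induction n with
  | zero =>
      intro cs h
      have : cs = [] := List.eq_nil_of_length_eq_zero (Nat.le_zero.mp h)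
      subst this
      intro il isz uc nn cd out
      simp [pvGoA, pvTokens, pvGoB, pvJoinB]
  | succ n ih =>
      intro cs h il isz uc nn cd out
      match cs with
      | [] => simp [pvGoA, pvTokens, pvGoB, pvJoinB]
      | c :: cs =>
        have hlen : cs.length ≤ n := Nat.succ_le_succ_iff.mp h
        by_cases hp : c = '('
        · subst hp
          rw [pvGoA, pvTokens_delim '(' cs rfl, pvGoB]
          simp only [reduceIte]
          simp [ih cs hlen, pvJoinB, pvSpacesB_eq]
        · by_cases hc : c = ':'
          · subst hc
            rw [pvGoA, pvTokens_delim ':' cs rfl, pvGoB]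
            simp only [reduceIte]
            simp [ih cs hlen, pvJoinB, pvSpacesB_eq]
          · by_cases hr : c = ')'
            · subst hr
              rw [pvGoA, pvTokens_delim ')' cs rfl, pvGoB]
              simp only [reduceIte]
              by_cases hd : cd.head? = some (il - 1)
              · rw [if_pos hd, if_pos hd]
                simp [ih cs hlen, pvJoinB, pvSpacesB_eq]
              · rw [if_neg hd, if_neg hd]
                simp [ih cs hlen, pvJoinB, pvSpacesB_eq]
            · by_cases hs : c = ' '
              · subst hs
                rw [pvGoA, pvTokens_delim ' ' cs rfl, pvGoB]
                simp only [reduceIte]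
                simp [ih cs hlen, pvJoinB, pvSpacesB_eq]
              · -- identifier branch
                have hdl : pvDelimB c = false := by
                  simp [pvDelimB, hp, hc, hr, hs]
                have hrest : (pvScanB cs).2.length ≤ n :=
                  le_trans (pvScanB_len cs) hlen
                have ih2 := ih (pvScanB cs).2 hrest
                rw [pvGoA, pvTokens_ident c cs hdl, pvGoB]
                simp only [List.cons.injEq, hp, hc, hr, hs, false_and, if_false]
                rw [pvScan_eq]
                by_cases hnn : nn <;> simp [hnn, ih2, pvJoinB, pvSpacesB_eq]

-- ===== VERDICT (by name: the statement is the Claim_ definition above) =====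
theorem format_sexpression_spec : Claim_equal_format_sexpression := by
  intro s il isz uc _
  unfold Spec_format_sexpression format_sexpression format_sexpression_alt
  rw [pvGoA_eq_goB s.toList.length s.toList (le_refl _)]
  simp
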